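-- pv_equiv track=rewrite | github.com/anushka-codes11/Lab1-18feb | Lab-work/attendace tracker lab 23 feb .py | has_consecutive_absence
-- ===== SOURCE A (Python) =====
-- def has_consecutive_absence(attendance, n=2):
--     """Check if student has n or more consecutive absences"""
--     count = 0
--     for a in attendance:
--         if a == 0:
--             count += 1
--             if count >= n:
--                 return True
--         else:
--             count = 0
--     return False
-- ===== SOURCE B (Python) =====
-- def _run_end(attendance, i):
--     """Index just past the maximal run of equal elements starting at i."""
--     x = attendance[i]
--     j = i + 1
--     while j < len(attendance) and attendance[j] == x:
--         j += 1
--     return j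
--
--
-- def has_consecutive_absence(attendance, n=2):
--     """Check if student has n or more consecutive absences"""
--     i = 0
--     while i < len(attendance):
--         j = _run_end(attendance, i)
--         if attendance[i] == 0 and j - i >= n:
--             return True
--         i = j
--     return False
-- ===== Notes on version B (the rewrite author's own statement) =====
-- stated objective: alternative
-- what changed: B partitions the list into maximal runs of equal elements (group-by-runs) and tests each zero-run's length against n, instead of A's single running counter that resets on non-zero elements.
import Mathlib
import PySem

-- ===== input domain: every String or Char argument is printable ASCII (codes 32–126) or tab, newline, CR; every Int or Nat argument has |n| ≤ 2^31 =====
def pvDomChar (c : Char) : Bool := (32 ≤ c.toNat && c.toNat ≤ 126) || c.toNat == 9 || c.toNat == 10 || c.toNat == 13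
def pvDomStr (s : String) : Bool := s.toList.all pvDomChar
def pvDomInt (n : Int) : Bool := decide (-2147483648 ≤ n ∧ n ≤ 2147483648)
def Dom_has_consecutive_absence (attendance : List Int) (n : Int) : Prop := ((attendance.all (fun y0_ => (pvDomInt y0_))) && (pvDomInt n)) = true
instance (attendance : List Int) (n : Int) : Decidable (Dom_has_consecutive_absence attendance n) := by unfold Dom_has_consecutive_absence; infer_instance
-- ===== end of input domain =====

-- B replaces A's resetting counter by segmenting the list into maximal runs of equal
-- elements and testing each zero-run's length against n (alternative decomposition).

-- ===== PORT A =====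
-- A's loop: running count of consecutive zeros, early return when count >= n.
def hcaLoopA (n : Int) (count : Int) : List Int → Bool
  | [] => false
  | a :: rest =>
    if a == 0 then
      if count + 1 ≥ n then true else hcaLoopA n (count + 1) rest
    else hcaLoopA n 0 rest

def has_consecutive_absence (attendance : List Int) (n : Int) : Bool :=
  hcaLoopA n 0 attendance

-- ===== PORT B =====
-- _take_run: length of the maximal run of x at the front of x :: xs, and the remainder.
def takeRunB (x : Int) : List Int → Int × List Int
  | [] => (1, [])
  | y :: ys =>
    if y == x then
      let p := takeRunB x ys
      (p.1 + 1, p.2)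
    else (1, y :: ys)

theorem takeRunB_len_le (x : Int) (xs : List Int) : (takeRunB x xs).2.length ≤ xs.length := by
  induction xs with
  | nil => simp [takeRunB]
  | cons y ys ih =>
    by_cases h : y == x <;> simp [takeRunB, h] <;> try omega

def hcaLoopB (n : Int) : List Int → Bool
  | [] => false
  | x :: rest =>
    let p := takeRunB x rest
    if x == 0 && p.1 ≥ n then true else hcaLoopB n p.2
termination_by xs => xs.length
decreasing_by
  simpa using Nat.lt_succ_of_le (takeRunB_len_le x rest)

def has_consecutive_absence_alt (attendance : List Int) (n : Int) : Bool :=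
  hcaLoopB n attendance

-- ===== PRECONDITION & SPEC =====
def Spec_has_consecutive_absence (attendance : List Int) (n : Int) (out : Bool) : Prop := out = has_consecutive_absence_alt attendance n
instance (attendance : List Int) (n : Int) (out : Bool) : Decidable (Spec_has_consecutive_absence attendance n out) := by unfold Spec_has_consecutive_absence; infer_instance

-- ===== CLAIM (what is proved, stated in full; the proofs are below) =====
def Claim_equal_has_consecutive_absence : Prop := ∀ (attendance : List Int) (n : Int), Dom_has_consecutive_absence attendance n → Spec_has_consecutive_absence attendance n (has_consecutive_absence attendance n)

-- ===== LEMMAS AND PROOFS =====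

-- takeRunB x xs returns (k+1, rest) with xs = replicate k x ++ rest, rest not starting with x.
theorem takeRunB_spec (x : Int) (xs : List Int) :
    ∃ k : Nat, (takeRunB x xs).1 = (k : Int) + 1 ∧
      xs = List.replicate k x ++ (takeRunB x xs).2 ∧
      (∀ y ys, (takeRunB x xs).2 = y :: ys → y ≠ x) := by
  induction xs with
  | nil => exact ⟨0, by simp [takeRunB]⟩
  | cons y ys ih =>
    by_cases h : y == x
    · obtain ⟨k, h1, h2, h3⟩ := ih
      have hy : y = x := by simpa using h
      have e2 : (takeRunB x (y :: ys)).2 = (takeRunB x ys).2 := by simp [takeRunB, h]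
      refine ⟨k + 1, ?_, ?_, ?_⟩
      · have e1 : (takeRunB x (y :: ys)).1 = (takeRunB x ys).1 + 1 := by simp [takeRunB, h]
        rw [e1, h1]; push_cast; ring
      · rw [e2, List.replicate_succ, hy]
        simpa using h2
      · intro z zs hz
        rw [e2] at hz
        exact h3 z zs hz
    · have hy : y ≠ x := by simpa using h
      have e2 : (takeRunB x (y :: ys)).2 = y :: ys := by simp [takeRunB, h]
      refine ⟨0, by simp [takeRunB, h], by simp [e2], ?_⟩
      intro z zs hz
      rw [e2] at hz
      injection hz with hz1 _
      rw [← hz1]; exact hy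

-- A through a run of zeros of length k, starting with counter `count`.
theorem hcaLoopA_zero_run (k : Nat) (rest : List Int) (n count : Int) :
    hcaLoopA n count (List.replicate k (0 : Int) ++ rest) =
      if 1 ≤ k ∧ n ≤ count + k then true else hcaLoopA n (count + k) rest := by
  induction k generalizing count with
  | zero => simp
  | succ k ih =>
    have e : count + 1 + (k : Int) = count + ((k + 1 : Nat) : Int) := by push_cast; ring
    simp only [List.replicate_succ, List.cons_append, hcaLoopA, beq_self_eq_true, if_true]
    rw [ih, e]
    split_ifs
    all_goals try rfl
    all_goals (exfalso; omega)

-- A through a nonempty run of a nonzero element: the counter resets and the run is skipped.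
theorem hcaLoopA_skip_run (x : Int) (hx : x ≠ 0) (k : Nat) (rest : List Int) (n count : Int) :
    hcaLoopA n count (List.replicate (k + 1) x ++ rest) = hcaLoopA n 0 rest := by
  induction k generalizing count with
  | zero =>
    have hbx : (x == 0) = false := by simpa using hx
    simp [hcaLoopA, hbx]
  | succ k ih =>
    have hbx : (x == 0) = false := by simpa using hx
    rw [List.replicate_succ, List.cons_append]
    simp only [hcaLoopA, hbx, if_false, Bool.false_eq_true]
    exact ih 0

-- The counter is irrelevant when the next element is nonzero (or the list ends).
theorem hcaLoopA_count_irrel (rest : List Int) (n c : Int)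
    (h : ∀ y ys, rest = y :: ys → y ≠ 0) :
    hcaLoopA n c rest = hcaLoopA n 0 rest := by
  cases rest with
  | nil => rfl
  | cons y ys =>
    have hbx : (y == 0) = false := by simpa using h y ys rfl
    simp [hcaLoopA, hbx]

theorem hca_eq (xs : List Int) (n : Int) : hcaLoopA n 0 xs = hcaLoopB n xs := by
  induction hl : xs.length using Nat.strong_induction_on generalizing xs with
  | _ L ih =>
  cases xs with
  | nil => simp [hcaLoopA, hcaLoopB]
  | cons x rest =>
    obtain ⟨k, h1, h2, h3⟩ := takeRunB_spec x rest
    have hlen : (takeRunB x rest).2.length < L := by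
      have := takeRunB_len_le x rest
      simp at hl; omega
    have ihrest := ih _ hlen (takeRunB x rest).2 rfl
    have hsplit : x :: rest = List.replicate (k + 1) x ++ (takeRunB x rest).2 := by
      rw [List.replicate_succ, List.cons_append, ← h2]
    rw [hcaLoopB]
    by_cases hx : x = 0
    · subst hx
      rw [hsplit, hcaLoopA_zero_run]
      by_cases hc : n ≤ ((k : Int) + 1)
      · have hL : 1 ≤ k + 1 ∧ n ≤ (0 : Int) + ((k + 1 : Nat) : Int) := ⟨by omega, by push_cast; omega⟩
        have hR : ((0 : Int) == 0 && decide ((takeRunB 0 rest).1 ≥ n)) = true := by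
          simp [h1]; omega
        rw [if_pos hL, if_pos hR]
      · have hL : ¬ (1 ≤ k + 1 ∧ n ≤ (0 : Int) + ((k + 1 : Nat) : Int)) := by
          push_cast; omega
        have hR : ((0 : Int) == 0 && decide ((takeRunB 0 rest).1 ≥ n)) = false := by
          simp [h1]; omega
        rw [if_neg hL, hcaLoopA_count_irrel _ _ _ h3, ihrest,
          if_neg (by simp; rw [h1]; omega : ¬ ((0 : Int) == 0 && decide ((takeRunB 0 rest).1 ≥ n)) = true)]
    · have hbx : (x == 0) = false := by simpa using hx
      rw [hsplit, hcaLoopA_skip_run x hx, ihrest,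
        if_neg (by simp [hbx] : ¬ (x == 0 && decide ((takeRunB x rest).1 ≥ n)) = true)]

-- ===== VERDICT (by name: the statement is the Claim_ definition above) =====
theorem has_consecutive_absence_spec : Claim_equal_has_consecutive_absence := by
  intro attendance n _
  unfold Spec_has_consecutive_absence has_consecutive_absence has_consecutive_absence_alt
  exact hca_eq attendance n
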